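-- pv_equiv track=rewrite | github.com/david-arce/back-horarios | modelo_horarios.py | generate_possible_time_blocks
-- ===== SOURCE A (Python) =====
-- def generate_possible_time_blocks(available_slots, block_len):
--     """Bloques consecutivos de longitud block_len en unidades de 30min."""
--     blocks = []
--     for i in range(len(available_slots)):
--         block = []
--         for j in range(i, len(available_slots)):
--             if not block or available_slots[j] == block[-1] + 1:
--                 block.append(available_slots[j])
--                 if len(block) == block_len:
--                     blocks.append(block.copy())
--                     break
--             else:
--                 break
--     return blocks
-- ===== SOURCE B (Python) =====
-- def generate_possible_time_blocks(available_slots, block_len):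
--     """Bloques consecutivos de longitud block_len en unidades de 30min."""
--     if block_len <= 0:
--         return []
--     # one pass: segment into maximal runs of consecutive values
--     runs = []
--     cur = []
--     for v in available_slots:
--         if cur and v == cur[-1] + 1:
--             cur.append(v)
--         else:
--             if cur:
--                 runs.append(cur)
--             cur = [v]
--     if cur:
--         runs.append(cur)
--     # emit every window of length block_len inside each run
--     blocks = []
--     for run in runs:
--         for s in range(len(run) - block_len + 1):
--             blocks.append(run[s:s + block_len])
--     return blocks
-- ===== Notes on version B (the rewrite author's own statement) =====
-- stated objective: alternative
-- what changed: A rescans forward from every start index to rebuild each block; B segments the list once into maximal consecutive runs and then emits each length-block_len window of each run directly.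
import Mathlib
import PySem

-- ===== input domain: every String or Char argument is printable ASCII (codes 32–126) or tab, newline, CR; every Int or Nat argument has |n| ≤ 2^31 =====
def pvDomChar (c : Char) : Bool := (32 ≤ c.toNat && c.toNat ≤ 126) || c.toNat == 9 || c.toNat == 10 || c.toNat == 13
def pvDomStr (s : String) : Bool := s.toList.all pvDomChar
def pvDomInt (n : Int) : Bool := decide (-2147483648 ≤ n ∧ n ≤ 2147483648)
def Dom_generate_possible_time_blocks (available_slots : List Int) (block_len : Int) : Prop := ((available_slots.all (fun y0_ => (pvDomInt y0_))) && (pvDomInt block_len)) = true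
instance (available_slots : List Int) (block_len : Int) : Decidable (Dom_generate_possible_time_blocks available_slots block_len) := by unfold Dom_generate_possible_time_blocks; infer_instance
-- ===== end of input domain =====

-- B replaces A's per-start rescans by one segmentation pass into maximal consecutive
-- runs followed by direct window emission over each run.

-- ===== PORT A =====
-- inner `for j in range(i, len)` loop of A: returns `some block` when a block of
-- length block_len is appended (A then breaks), `none` when the loop breaks or ends.
def pvInnerA (xs : List Int) (bl : Int) (j : Nat) (block : List Int) : Option (List Int) :=
  if h : j < xs.length then
    if block = [] ∨ xs[j] = block.getLastD 0 + 1 then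
      if ((block.length + 1 : Nat) : Int) = bl then some (block ++ [xs[j]])
      else pvInnerA xs bl (j + 1) (block ++ [xs[j]])
    else none
  else none
termination_by xs.length - j

def generate_possible_time_blocks (available_slots : List Int) (block_len : Int) : List (List Int) :=
  (List.range available_slots.length).foldl
    (fun blocks i =>
      match pvInnerA available_slots block_len i [] with
      | some b => blocks ++ [b]
      | none => blocks) []

-- ===== PORT B =====
-- one step of B's segmentation loop: state = (runs so far, current run)
def pvStepB (st : List (List Int) × List Int) (v : Int) : List (List Int) × List Int :=
  if st.2 ≠ [] ∧ v = st.2.getLastD 0 + 1 then (st.1, st.2 ++ [v])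
  else ((if st.2 ≠ [] then st.1 ++ [st.2] else st.1), [v])

def generate_possible_time_blocks_alt (available_slots : List Int) (block_len : Int) : List (List Int) :=
  if block_len ≤ 0 then []
  else
    let st := available_slots.foldl pvStepB ([], [])
    let runs := if st.2 ≠ [] then st.1 ++ [st.2] else st.1
    runs.foldl
      (fun blocks run =>
        (PySem.List.pyRange 0 ((run.length : Int) - block_len + 1) 1).foldl
          (fun b s => b ++ [PySem.List.slice run (some s) (some (s + block_len))]) blocks) []

-- ===== PRECONDITION & SPEC =====
def Spec_generate_possible_time_blocks (available_slots : List Int) (block_len : Int) (out : List (List Int)) : Prop := out = generate_possible_time_blocks_alt available_slots block_len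
instance (available_slots : List Int) (block_len : Int) (out : List (List Int)) : Decidable (Spec_generate_possible_time_blocks available_slots block_len out) := by unfold Spec_generate_possible_time_blocks; infer_instance

-- ===== CLAIM (what is proved, stated in full; the proofs are below) =====
def Claim_equal_generate_possible_time_blocks : Prop := ∀ (available_slots : List Int) (block_len : Int), Dom_generate_possible_time_blocks available_slots block_len → Spec_generate_possible_time_blocks available_slots block_len (generate_possible_time_blocks available_slots block_len)

-- ===== LEMMAS AND PROOFS =====

-- length of the maximal chain a+1, a+2, … at the head of a list
def pvChain (a : Int) : List Int → Nat
  | [] => 0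
  | v :: r => if v = a + 1 then pvChain v r + 1 else 0

-- length of the maximal consecutive run at the head
def pvRunLen : List Int → Nat
  | [] => 0
  | v :: r => pvChain v r + 1

-- maximal consecutive runs (the normal form both programs are reduced to)
def pvRuns : List Int → List (List Int)
  | [] => []
  | v :: r => (v :: r.take (pvChain v r)) :: pvRuns (r.drop (pvChain v r))
termination_by xs => xs.length
decreasing_by simp

-- all windows of length b of a run
def pvWindows (b : Nat) (g : List Int) : List (List Int) :=
  if b ≤ g.length then (List.range (g.length - b + 1)).map (fun s => (g.drop s).take b) else []

def pvNorm (xs : List Int) (bl : Int) : List (List Int) :=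
  if bl ≤ 0 then [] else (pvRuns xs).flatMap (pvWindows bl.toNat)

-- structural version of A's inner loop
def pvInnerA' (bl : Int) : List Int → List Int → Option (List Int)
  | [], _ => none
  | v :: rest, block =>
    if block = [] ∨ v = block.getLastD 0 + 1 then
      if ((block.length + 1 : Nat) : Int) = bl then some (block ++ [v])
      else pvInnerA' bl rest (block ++ [v])
    else none

lemma pvInnerA_eq_inner' (xs : List Int) (bl : Int) :
    ∀ k j block, xs.length - j ≤ k → pvInnerA xs bl j block = pvInnerA' bl (xs.drop j) block := by
  intro k
  induction k with
  | zero =>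
      intro j block hk
      have hj : xs.length ≤ j := by omega
      rw [List.drop_eq_nil_of_le hj, pvInnerA, dif_neg (Nat.not_lt.mpr hj), pvInnerA']
  | succ k ih =>
      intro j block hk
      by_cases h : j < xs.length
      · rw [List.drop_eq_getElem_cons h, pvInnerA]
        simp only [h, dif_pos]
        rw [pvInnerA']
        split
        · split
          · rfl
          · exact ih (j + 1) _ (by omega)
        · rfl
      · have hj : xs.length ≤ j := by omega
        rw [List.drop_eq_nil_of_le hj, pvInnerA, dif_neg (Nat.not_lt.mpr hj), pvInnerA']

lemma pvInnerA'_char (bl : Int) :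
    ∀ (ys block : List Int), block ≠ [] →
      pvInnerA' bl ys block =
        if (block.length : Int) < bl ∧ bl ≤ (block.length : Int) + (pvChain (block.getLastD 0) ys : Int)
        then some (block ++ ys.take (bl - block.length).toNat) else none := by
  intro ys
  induction ys with
  | nil =>
      intro block hb
      simp [pvInnerA', pvChain]
  | cons v rest ih =>
      intro block hb
      rw [pvInnerA']
      by_cases hv : v = block.getLastD 0 + 1
      · rw [if_pos (Or.inr hv)]
        have hch : pvChain (block.getLastD 0) (v :: rest) = pvChain v rest + 1 := by
          rw [pvChain, if_pos hv]
        rw [hch]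
        by_cases hbl : ((block.length + 1 : Nat) : Int) = bl
        · rw [if_pos hbl]
          rw [if_pos ⟨by push_cast at hbl ⊢; omega, by push_cast at hbl ⊢; omega⟩]
          have h1 : (bl - (block.length : Int)).toNat = 1 := by push_cast at hbl; omega
          rw [h1]
          simp
        · rw [if_neg hbl]
          rw [ih (block ++ [v]) (by simp)]
          have hlast : (block ++ [v]).getLastD 0 = v := by simp
          rw [hlast]
          simp only [List.length_append, List.length_cons, List.length_nil]
          by_cases hc : (block.length : Int) < bl ∧ bl ≤ (block.length : Int) + ((pvChain v rest + 1 : Nat) : Int)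
          · rw [if_pos (by push_cast at hbl hc ⊢; omega)]
            rw [if_pos hc]
            have h1 : (bl - (block.length : Int)).toNat = (bl - ((block.length : Int) + (0 + 1))).toNat + 1 := by
              push_cast at hbl hc; omega
            rw [h1, List.take_succ_cons]
            simp [List.append_assoc]
          · rw [if_neg (by push_cast at hbl hc ⊢; omega)]
            rw [if_neg hc]
      · rw [if_neg (not_or.mpr ⟨hb, hv⟩)]
        have hch : pvChain (block.getLastD 0) (v :: rest) = 0 := by
          rw [pvChain, if_neg hv]
        rw [hch]
        rw [if_neg (by push_cast; omega)]

lemma pvInnerA'_top (bl : Int) (ys : List Int) :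
    pvInnerA' bl ys [] =
      if 1 ≤ bl ∧ bl ≤ (pvRunLen ys : Int) then some (ys.take bl.toNat) else none := by
  cases ys with
  | nil =>
      rw [pvRunLen]
      simp [pvInnerA']
      omega
  | cons v r =>
      rw [pvInnerA', if_pos (Or.inl rfl), pvRunLen]
      simp only [List.length_nil, List.nil_append, Nat.zero_add, Nat.cast_one]
      by_cases h1 : (1 : Int) = bl
      · rw [if_pos h1, if_pos ⟨by omega, by push_cast; omega⟩]
        have hb1 : bl.toNat = 1 := by omega
        rw [hb1]
        simp
      · rw [if_neg h1]
        rw [pvInnerA'_char bl r [v] (by simp)]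
        have hl : ([v] : List Int).getLastD 0 = v := by simp
        rw [hl]
        simp only [List.length_cons, List.length_nil, Nat.zero_add, Nat.cast_one]
        by_cases hc : (1 : Int) ≤ bl ∧ bl ≤ ((pvChain v r + 1 : Nat) : Int)
        · rw [if_pos (by push_cast at hc ⊢; omega), if_pos hc]
          have hk : bl.toNat = (bl - 1).toNat + 1 := by omega
          rw [hk, List.take_succ_cons]
          simp
        · rw [if_neg (by push_cast at hc ⊢; omega), if_neg hc]

lemma pvChain_le_length (a : Int) (ys : List Int) : pvChain a ys ≤ ys.length := by
  induction ys generalizing a with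
  | nil => simp [pvChain]
  | cons v r ih =>
      rw [pvChain]
      split
      · have := ih v; simp; omega
      · simp

lemma pvRunLen_le_length (xs : List Int) : pvRunLen xs ≤ xs.length := by
  cases xs with
  | nil => simp [pvRunLen]
  | cons v r =>
      rw [pvRunLen]
      have := pvChain_le_length v r
      simp
      omega

lemma pvRunLen_pos (xs : List Int) (h : xs ≠ []) : 1 ≤ pvRunLen xs := by
  cases xs with
  | nil => simp at h
  | cons v r => rw [pvRunLen]; omega

lemma pvRunLen_of_chain_pos (v : Int) (r : List Int) (h : 0 < pvChain v r) :
    pvRunLen r = pvChain v r := by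
  cases r with
  | nil => simp [pvChain] at h
  | cons w r' =>
      rw [pvChain] at h ⊢
      rw [pvRunLen]
      split at h
      · next hw => rw [if_pos hw]
      · omega

lemma pvRunLen_drop (xs : List Int) :
    ∀ i, i < pvRunLen xs → pvRunLen (xs.drop i) = pvRunLen xs - i := by
  intro i
  induction i generalizing xs with
  | zero => simp
  | succ i ih =>
      intro hi
      cases xs with
      | nil => rw [pvRunLen] at hi; omega
      | cons v r =>
          rw [pvRunLen] at hi
          have hch : 0 < pvChain v r := by omega
          have hr : pvRunLen r = pvChain v r := pvRunLen_of_chain_pos v r hch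
          have := ih (xs := r) (by omega)
          simp only [List.drop_succ_cons]
          rw [this, hr, pvRunLen]
          omega

lemma foldl_match_filterMap (f : Nat → Option (List Int)) :
    ∀ (l : List Nat) (acc : List (List Int)),
      l.foldl (fun blocks i => match f i with | some b => blocks ++ [b] | none => blocks) acc
        = acc ++ l.filterMap f := by
  intro l
  induction l with
  | nil => simp
  | cons x t ih =>
      intro acc
      simp only [List.foldl_cons, List.filterMap_cons]
      cases hx : f x <;> simp [ih]

lemma filterMap_ite_eq_map {α : Type} (p : Nat → Prop) [DecidablePred p] (g : Nat → α) :
    ∀ (l : List Nat), (∀ i ∈ l, p i) →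
      l.filterMap (fun i => if p i then some (g i) else none) = l.map g := by
  intro l
  induction l with
  | nil => simp
  | cons x t ih =>
      intro h
      simp only [List.filterMap_cons, List.map_cons]
      rw [if_pos (h x (by simp))]
      rw [ih (fun i hi => h i (by simp [hi]))]

lemma filterMap_ite_eq_nil {α : Type} (p : Nat → Prop) [DecidablePred p] (g : Nat → α) :
    ∀ (l : List Nat), (∀ i ∈ l, ¬ p i) →
      l.filterMap (fun i => if p i then some (g i) else none) = [] := by
  intro l
  induction l with
  | nil => simp
  | cons x t ih =>
      intro h
      simp only [List.filterMap_cons]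
      rw [if_neg (h x (by simp))]
      exact ih (fun i hi => h i (by simp [hi]))

lemma pvRuns_eq (xs : List Int) (h : xs ≠ []) :
    pvRuns xs = xs.take (pvRunLen xs) :: pvRuns (xs.drop (pvRunLen xs)) := by
  cases xs with
  | nil => simp at h
  | cons v r =>
      rw [pvRuns.eq_2, pvRunLen]
      simp

lemma A_norm_pos (bl : Int) (hbl : 1 ≤ bl) :
    ∀ (n : Nat) (xs : List Int), xs.length ≤ n →
      (List.range xs.length).filterMap (fun i => pvInnerA' bl (xs.drop i) [])
        = (pvRuns xs).flatMap (pvWindows bl.toNat) := by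
  intro n
  induction n with
  | zero =>
      intro xs hx
      have hxe : xs = [] := List.eq_nil_of_length_eq_zero (by omega)
      subst hxe
      rw [pvRuns.eq_1]
      simp
  | succ n ih =>
      intro xs hx
      rcases eq_or_ne xs [] with rfl | hne
      · rw [pvRuns.eq_1]
        simp
      · have hL1 : 1 ≤ pvRunLen xs := pvRunLen_pos xs hne
        have hLlen : pvRunLen xs ≤ xs.length := pvRunLen_le_length xs
        set L := pvRunLen xs with hLdef
        have hrange : List.range xs.length
            = List.range L ++ (List.range (xs.length - L)).map (fun i => L + i) := by
          rw [← List.range_add]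
          congr 1
          omega
        rw [hrange, List.filterMap_append]
        have h2 : ((List.range (xs.length - L)).map (fun i => L + i)).filterMap
              (fun i => pvInnerA' bl (xs.drop i) [])
            = (List.range (xs.drop L).length).filterMap (fun i => pvInnerA' bl ((xs.drop L).drop i) []) := by
          rw [List.filterMap_map]
          have hlen : (xs.drop L).length = xs.length - L := by simp
          rw [hlen]
          apply List.filterMap_congr
          intro i _
          simp only [Function.comp_apply]
          rw [List.drop_drop]
        rw [h2, ih (xs.drop L) (by simp; omega)]
        have h1 : (List.range L).filterMap (fun i => pvInnerA' bl (xs.drop i) [])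
            = pvWindows bl.toNat (xs.take L) := by
          have hcong : ∀ i ∈ List.range L, pvInnerA' bl (xs.drop i) [] =
              (if bl ≤ ((L - i : Nat) : Int) then some ((xs.drop i).take bl.toNat) else none) := by
            intro i hi
            rw [List.mem_range] at hi
            rw [pvInnerA'_top, pvRunLen_drop xs i (by omega)]
            by_cases hc : bl ≤ ((L - i : Nat) : Int)
            · rw [if_pos ⟨hbl, hc⟩, if_pos hc]
            · rw [if_neg (fun hh => hc hh.2), if_neg hc]
          rw [List.filterMap_congr hcong]
          by_cases hbL : bl.toNat ≤ L
          · have hLL : (xs.take L).length = L := by simp [hLlen]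
            rw [pvWindows, if_pos (by rw [hLL]; exact hbL), hLL]
            have hsp : List.range L = List.range (L - bl.toNat + 1)
                ++ (List.range (L - (L - bl.toNat + 1))).map (fun i => (L - bl.toNat + 1) + i) := by
              rw [← List.range_add]
              congr 1
              omega
            rw [hsp, List.filterMap_append]
            rw [filterMap_ite_eq_map (fun i => bl ≤ ((L - i : Nat) : Int)) _ _
              (by intro i hi; rw [List.mem_range] at hi; omega)]
            rw [filterMap_ite_eq_nil (fun i => bl ≤ ((L - i : Nat) : Int)) _ _
              (by intro i hi; simp only [List.mem_map, List.mem_range] at hi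
                  obtain ⟨k, hk, rfl⟩ := hi; push_cast; omega)]
            rw [List.append_nil]
            apply List.map_congr_left
            intro s hs
            rw [List.mem_range] at hs
            rw [List.drop_take, List.take_take]
            congr 1
            omega
          · rw [filterMap_ite_eq_nil (fun i => bl ≤ ((L - i : Nat) : Int)) _ _
              (by intro i hi; rw [List.mem_range] at hi; push_cast; omega)]
            rw [pvWindows, if_neg (by simp only [List.length_take]; omega)]
        rw [h1]
        rw [pvRuns_eq xs hne, List.flatMap_cons]

lemma A_norm (bl : Int) (xs : List Int) :
    (List.range xs.length).filterMap (fun i => pvInnerA' bl (xs.drop i) [])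
      = pvNorm xs bl := by
  unfold pvNorm
  by_cases hbl : bl ≤ 0
  · rw [if_pos hbl]
    have hnone : ∀ i ∈ List.range xs.length, pvInnerA' bl (xs.drop i) [] = (fun _ => (none : Option (List Int))) i := by
      intro i _
      rw [pvInnerA'_top]
      rw [if_neg (by omega)]
    rw [List.filterMap_congr hnone]
    simp
  · rw [if_neg hbl]
    exact A_norm_pos bl (by omega) xs.length xs le_rfl

-- ===== B side =====
def pvR : List Int → List Int → List (List Int)
  | cur, [] => if cur ≠ [] then [cur] else []
  | cur, v :: r =>
      if cur ≠ [] ∧ v = cur.getLastD 0 + 1 then pvR (cur ++ [v]) r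
      else (if cur ≠ [] then [cur] else []) ++ pvR [v] r

lemma foldl_pvStepB_finish :
    ∀ (ys : List Int) (runs : List (List Int)) (cur : List Int),
      (if (ys.foldl pvStepB (runs, cur)).2 ≠ [] then
          (ys.foldl pvStepB (runs, cur)).1 ++ [(ys.foldl pvStepB (runs, cur)).2]
        else (ys.foldl pvStepB (runs, cur)).1)
      = runs ++ pvR cur ys := by
  intro ys
  induction ys with
  | nil =>
      intro runs cur
      rw [pvR]
      simp only [List.foldl_nil]
      split <;> simp
  | cons v r ih =>
      intro runs cur
      simp only [List.foldl_cons]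
      by_cases hc : cur ≠ [] ∧ v = cur.getLastD 0 + 1
      · have hstep : pvStepB (runs, cur) v = (runs, cur ++ [v]) := by
          simp only [pvStepB]; rw [if_pos hc]
        rw [hstep, pvR, if_pos hc]
        exact ih runs (cur ++ [v])
      · have hstep : pvStepB (runs, cur) v = ((if cur ≠ [] then runs ++ [cur] else runs), [v]) := by
          simp only [pvStepB]; rw [if_neg hc]
        rw [hstep, pvR, if_neg hc, ih _ [v]]
        split <;> simp [List.append_assoc]

lemma pvR_char :
    ∀ (ys cur : List Int), cur ≠ [] →
      pvR cur ys = (cur ++ ys.take (pvChain (cur.getLastD 0) ys))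
                    :: pvR [] (ys.drop (pvChain (cur.getLastD 0) ys)) := by
  intro ys
  induction ys with
  | nil =>
      intro cur hc
      rw [pvR, if_pos hc, pvChain]
      simp [pvR]
  | cons v r ih =>
      intro cur hc
      rw [pvR]
      by_cases hv : v = cur.getLastD 0 + 1
      · rw [if_pos ⟨hc, hv⟩]
        rw [ih (cur ++ [v]) (by simp)]
        have hlast : (cur ++ [v]).getLastD 0 = v := by simp
        rw [hlast]
        have hch : pvChain (cur.getLastD 0) (v :: r) = pvChain v r + 1 := by
          rw [pvChain, if_pos hv]
        rw [hch, List.take_succ_cons, List.drop_succ_cons]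
        simp [List.append_assoc]
      · rw [if_neg (by tauto)]
        have hch : pvChain (cur.getLastD 0) (v :: r) = 0 := by
          rw [pvChain, if_neg hv]
        have hnil : pvR [] (v :: r) = pvR [v] r := by
          rw [pvR]
          simp
        rw [hch]
        simp only [List.take_zero, List.drop_zero, List.append_nil]
        rw [hnil, if_pos hc]
        simp

lemma pvR_nil_eq_runs : ∀ (n : Nat) (xs : List Int), xs.length ≤ n → pvR [] xs = pvRuns xs := by
  intro n
  induction n with
  | zero =>
      intro xs hx
      have hxe : xs = [] := List.eq_nil_of_length_eq_zero (by omega)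
      subst hxe
      rw [pvR, pvRuns]
      simp
  | succ n ih =>
      intro xs hx
      cases xs with
      | nil => rw [pvR, pvRuns]; simp
      | cons v r =>
          have hnil : pvR [] (v :: r) = pvR [v] r := by
            rw [pvR]; simp
          rw [hnil, pvR_char r [v] (by simp)]
          have hl : ([v] : List Int).getLastD 0 = v := by simp
          rw [hl]
          rw [ih (r.drop (pvChain v r)) (by simp at hx ⊢; omega)]
          rw [pvRuns.eq_2]
          simp

lemma windows_foldl (bl : Int) (hbl : 0 < bl) (g : List Int) (acc : List (List Int)) :
    (PySem.List.pyRange 0 ((g.length : Int) - bl + 1) 1).foldl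
        (fun b s => b ++ [PySem.List.slice g (some s) (some (s + bl))]) acc
      = acc ++ pvWindows bl.toNat g := by
  rw [PySem.List.pyRange_one]
  simp only [Int.sub_zero]
  rw [List.foldl_map, PySem.List.foldl_append_singleton_eq_map]
  by_cases hle : bl ≤ (g.length : Int)
  · rw [pvWindows, if_pos (by omega)]
    have ht : ((g.length : Int) - bl + 1).toNat = g.length - bl.toNat + 1 := by omega
    rw [ht]
    congr 1
    apply List.map_congr_left
    intro k hk
    rw [List.mem_range] at hk
    rw [PySem.List.slice_toNat g (a := 0 + (k : Int)) (b := 0 + (k : Int) + bl)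
      (by omega) (by omega)]
    have h1 : (0 + (k : Int)).toNat = k := by omega
    rw [h1]
    congr 1
    omega
  · rw [pvWindows, if_neg (by omega)]
    have ht : ((g.length : Int) - bl + 1).toNat = 0 := by omega
    rw [ht]
    simp

lemma runs_foldl (bl : Int) (hbl : 0 < bl) :
    ∀ (runs : List (List Int)) (acc : List (List Int)),
      runs.foldl
        (fun blocks run =>
          (PySem.List.pyRange 0 ((run.length : Int) - bl + 1) 1).foldl
            (fun b s => b ++ [PySem.List.slice run (some s) (some (s + bl))]) blocks) acc
      = acc ++ runs.flatMap (pvWindows bl.toNat) := by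
  intro runs
  induction runs with
  | nil => simp
  | cons g t ih =>
      intro acc
      simp only [List.foldl_cons, List.flatMap_cons]
      rw [windows_foldl bl hbl g acc, ih, List.append_assoc]

lemma B_norm (xs : List Int) (bl : Int) :
    generate_possible_time_blocks_alt xs bl = pvNorm xs bl := by
  unfold generate_possible_time_blocks_alt pvNorm
  by_cases hbl : bl ≤ 0
  · rw [if_pos hbl, if_pos hbl]
  · rw [if_neg hbl, if_neg hbl]
    simp only []
    have hruns : (if (xs.foldl pvStepB ([], [])).2 ≠ [] then
          (xs.foldl pvStepB ([], [])).1 ++ [(xs.foldl pvStepB ([], [])).2]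
        else (xs.foldl pvStepB ([], [])).1) = pvRuns xs := by
      rw [foldl_pvStepB_finish xs [] [], List.nil_append]
      exact pvR_nil_eq_runs xs.length xs le_rfl
    rw [hruns, runs_foldl bl (by omega) (pvRuns xs) [], List.nil_append]

-- ===== VERDICT (by name: the statement is the Claim_ definition above) =====
theorem generate_possible_time_blocks_spec : Claim_equal_generate_possible_time_blocks := by
  intro xs bl _
  unfold Spec_generate_possible_time_blocks
  rw [B_norm]
  unfold generate_possible_time_blocks
  rw [foldl_match_filterMap]
  rw [List.nil_append]
  rw [List.filterMap_congr (fun i _ => pvInnerA_eq_inner' xs bl xs.length i [] (by omega))]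
  exact A_norm bl xs
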